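-- pv_equiv track=rewrite | github.com/lchk02/PythonHub | py_ex/test.py | sum_x
-- ===== SOURCE A (Python) =====
-- from collections import defaultdict
--
-- def sum_x(arr, flag):
--     n = len(arr)
--     d, c, ans = defaultdict(int), defaultdict(int), [0] * n  # d用来存值上一次出现的位置，c用来存次数
--     l = range(n) if flag else reversed(range(n))  # 判断正序还是逆序
--     for i in l:
--         j = arr[i]
--         c[j] += 1  # 更新j的次数
--         ans[i] = abs(i - d[j]) * (c[j] - 1) + ans[d[j]]  # 计算公式
--         d[j] = i  # 更新j的位置
--     return ans
-- ===== SOURCE B (Python) =====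
-- def sum_x(arr, flag):
--     n = len(arr)
--     if flag:
--         return [sum(i - p for p in range(i) if arr[p] == arr[i]) for i in range(n)]
--     else:
--         return [sum(p - i for p in range(i + 1, n) if arr[p] == arr[i]) for i in range(n)]
-- ===== Notes on version B (the rewrite author's own statement) =====
-- stated objective: simpler
-- what changed: A's online DP over two defaultdicts (last position and count per value, with a lookback into the partially built answer array) is replaced by a direct per-index comprehension that sums the distances to earlier (flag) or later (not flag) equal values.
import Mathlib
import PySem

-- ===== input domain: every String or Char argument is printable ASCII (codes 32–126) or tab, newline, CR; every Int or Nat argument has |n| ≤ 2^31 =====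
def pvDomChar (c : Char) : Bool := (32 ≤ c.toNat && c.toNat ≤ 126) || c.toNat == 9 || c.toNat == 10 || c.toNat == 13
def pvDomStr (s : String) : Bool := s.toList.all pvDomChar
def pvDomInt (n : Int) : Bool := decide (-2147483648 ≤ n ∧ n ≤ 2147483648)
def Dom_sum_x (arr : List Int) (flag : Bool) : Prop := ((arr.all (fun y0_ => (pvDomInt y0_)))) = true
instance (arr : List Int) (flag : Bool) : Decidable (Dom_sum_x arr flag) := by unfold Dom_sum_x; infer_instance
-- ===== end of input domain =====

-- B replaces A's online DP (two defaultdicts plus a lookback into the answer array) by a direct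
-- per-index comprehension summing distances to equal values; simpler, not faster.

-- ===== PORT A =====
-- the body of A's for-loop, named so the proofs can speak about one iteration
def sumxStep (arr : List Int) (st : PySem.Dict Int Int × PySem.Dict Int Int × List Int) (i : Int) :
    PySem.Dict Int Int × PySem.Dict Int Int × List Int :=
  let d := st.1
  let c := st.2.1
  let ans := st.2.2
  let j := PySem.List.pyGetD arr i 0                 -- j = arr[i]; i ∈ range(len(arr)) so in range: exact
  let c := c.modify j 0 (· + 1)                      -- c[j] += 1 on defaultdict(int)
  -- ans[i] = abs(i - d[j]) * (c[j] - 1) + ans[d[j]]; d[j] is 0 or an earlier loop index: in range, exact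
  let ans := PySem.List.pySetD ans i
      (|i - d.getD j 0| * (c.getD j 0 - 1) + PySem.List.pyGetD ans (d.getD j 0) 0)
  let d := d.insert j i                              -- d[j] = i
  (d, c, ans)

def sum_x (arr : List Int) (flag : Bool) : List Int :=
  let n : Int := (arr.length : Int)
  -- l = range(n) if flag else reversed(range(n))
  let l : List Int := if flag then PySem.List.pyRange 0 n 1 else (PySem.List.pyRange 0 n 1).reverse
  (l.foldl (sumxStep arr) (PySem.Dict.empty, PySem.Dict.empty, List.replicate arr.length 0)).2.2

-- ===== PORT B =====
def sum_x_alt (arr : List Int) (flag : Bool) : List Int :=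
  let n : Int := (arr.length : Int)
  if flag then
    (PySem.List.pyRange 0 n 1).map (fun i =>
      (((PySem.List.pyRange 0 i 1).filter
          (fun p => PySem.List.pyGetD arr p 0 == PySem.List.pyGetD arr i 0)).map
        (fun p => i - p)).sum)
  else
    (PySem.List.pyRange 0 n 1).map (fun i =>
      (((PySem.List.pyRange (i + 1) n 1).filter
          (fun p => PySem.List.pyGetD arr p 0 == PySem.List.pyGetD arr i 0)).map
        (fun p => p - i)).sum)

-- ===== PRECONDITION & SPEC =====
def Spec_sum_x (arr : List Int) (flag : Bool) (out : List Int) : Prop := out = sum_x_alt arr flag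
instance (arr : List Int) (flag : Bool) (out : List Int) : Decidable (Spec_sum_x arr flag out) := by unfold Spec_sum_x; infer_instance

-- ===== CLAIM (what is proved, stated in full; the proofs are below) =====
def Claim_equal_sum_x : Prop := ∀ (arr : List Int) (flag : Bool), Dom_sum_x arr flag → Spec_sum_x arr flag (sum_x arr flag)

-- ===== LEMMAS AND PROOFS =====

-- forward bookkeeping over the first k indices, for a value v:
-- cF = how many of arr[0..k) equal v, pF = position of the last such (0 if none),
-- sF = sum of (t - p) over those positions p
def cF (arr : List Int) : Nat → Int → Int
  | 0, _ => 0
  | k+1, v => cF arr k v + (if arr.getD k 0 = v then 1 else 0)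
def pF (arr : List Int) : Nat → Int → Int
  | 0, _ => 0
  | k+1, v => if arr.getD k 0 = v then (k : Int) else pF arr k v
def sF (arr : List Int) : Nat → Int → Int → Int
  | 0, _, _ => 0
  | k+1, v, t => sF arr k v t + (if arr.getD k 0 = v then t - (k : Int) else 0)

-- backward bookkeeping over the k indices processed from the top (arr.length-1 downwards)
def cB (arr : List Int) : Nat → Int → Int
  | 0, _ => 0
  | k+1, v => cB arr k v + (if arr.getD (arr.length - 1 - k) 0 = v then 1 else 0)
def pB (arr : List Int) : Nat → Int → Int
  | 0, _ => 0
  | k+1, v => if arr.getD (arr.length - 1 - k) 0 = v then ((arr.length - 1 - k : Nat) : Int) else pB arr k v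
def sB (arr : List Int) : Nat → Int → Int → Int
  | 0, _, _ => 0
  | k+1, v, t => sB arr k v t + (if arr.getD (arr.length - 1 - k) 0 = v then ((arr.length - 1 - k : Nat) : Int) - t else 0)

lemma getD_set_eq (l : List Int) (k : Nat) (w : Int) (i : Nat) (hk : k < l.length) :
    (l.set k w).getD i 0 = if i = k then w else l.getD i 0 := by
  simp only [List.getD, List.getElem?_set]
  by_cases h : i = k
  · simp [h, hk]
  · rw [if_neg (by omega), if_neg h]

lemma cF_nonneg (arr : List Int) (k : Nat) (v : Int) : (0:Int) ≤ cF arr k v := by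
  induction k with
  | zero => simp [cF]
  | succ k ih =>
    by_cases h : arr.getD k 0 = v
    · simp only [cF, if_pos h]; omega
    · simp only [cF, if_neg h]; omega

lemma shiftF (arr : List Int) (k : Nat) (v t s : Int) :
    sF arr k v t = sF arr k v s + (t - s) * cF arr k v := by
  induction k with
  | zero => simp [sF, cF]
  | succ k ih =>
    by_cases h : arr.getD k 0 = v
    · simp only [sF, cF, ih, if_pos h]; ring
    · simp only [sF, cF, ih, if_neg h]; ring

lemma zeroF (arr : List Int) (k : Nat) (v : Int) (h : cF arr k v = 0) :
    (∀ t, sF arr k v t = 0) ∧ pF arr k v = 0 := by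
  induction k with
  | zero => simp [sF, pF]
  | succ k ih =>
    by_cases hg : arr.getD k 0 = v
    · exfalso
      have h1 : cF arr (k+1) v = cF arr k v + 1 := by simp only [cF, if_pos hg]
      have h2 := cF_nonneg arr k v
      omega
    · have h0 : cF arr (k+1) v = cF arr k v := by simp only [cF, if_neg hg]; ring
      obtain ⟨hs, hp⟩ := ih (by omega)
      exact ⟨fun t => by simp only [sF, if_neg hg, hs]; ring,
             by simp only [pF, if_neg hg, hp]⟩

lemma posF (arr : List Int) (k : Nat) (v : Int) (h : 0 < cF arr k v) :
    ∃ p : Nat, pF arr k v = (p : Int) ∧ p < k ∧ arr.getD p 0 = v ∧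
      ∀ t, sF arr k v t = (t - (p : Int)) * cF arr k v + sF arr p v (p : Int) := by
  induction k with
  | zero => simp [cF] at h
  | succ k ih =>
    by_cases hg : arr.getD k 0 = v
    · refine ⟨k, by simp only [pF, if_pos hg], by omega, hg, fun t => ?_⟩
      simp only [sF, cF, if_pos hg]
      rw [shiftF arr k v t (k : Int)]
      ring
    · have hc : cF arr (k+1) v = cF arr k v := by simp only [cF, if_neg hg]; ring
      obtain ⟨p, hp, hpk, hgp, hs⟩ := ih (by omega)
      refine ⟨p, by simp only [pF, if_neg hg, hp], by omega, hgp, fun t => ?_⟩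
      simp only [sF, if_neg hg, hs t, hc]
      ring

lemma cB_nonneg (arr : List Int) (k : Nat) (v : Int) : (0:Int) ≤ cB arr k v := by
  induction k with
  | zero => simp [cB]
  | succ k ih =>
    by_cases h : arr.getD (arr.length - 1 - k) 0 = v
    · simp only [cB, if_pos h]; omega
    · simp only [cB, if_neg h]; omega

lemma shiftB (arr : List Int) (k : Nat) (v t s : Int) :
    sB arr k v t = sB arr k v s + (s - t) * cB arr k v := by
  induction k with
  | zero => simp [sB, cB]
  | succ k ih =>
    by_cases h : arr.getD (arr.length - 1 - k) 0 = v
    · simp only [sB, cB, ih, if_pos h]; ring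
    · simp only [sB, cB, ih, if_neg h]; ring

lemma zeroB (arr : List Int) (k : Nat) (v : Int) (h : cB arr k v = 0) :
    (∀ t, sB arr k v t = 0) ∧ pB arr k v = 0 := by
  induction k with
  | zero => simp [sB, pB]
  | succ k ih =>
    by_cases hg : arr.getD (arr.length - 1 - k) 0 = v
    · exfalso
      have h1 : cB arr (k+1) v = cB arr k v + 1 := by simp only [cB, if_pos hg]
      have h2 := cB_nonneg arr k v
      omega
    · have h0 : cB arr (k+1) v = cB arr k v := by simp only [cB, if_neg hg]; ring
      obtain ⟨hs, hp⟩ := ih (by omega)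
      exact ⟨fun t => by simp only [sB, if_neg hg, hs]; ring,
             by simp only [pB, if_neg hg, hp]⟩

lemma posB (arr : List Int) (k : Nat) (v : Int) (hk : k ≤ arr.length) (h : 0 < cB arr k v) :
    ∃ p : Nat, pB arr k v = (p : Int) ∧ arr.length - k ≤ p ∧ p < arr.length ∧ arr.getD p 0 = v ∧
      ∀ t, sB arr k v t = ((p : Int) - t) * cB arr k v + sB arr (arr.length - 1 - p) v (p : Int) := by
  induction k with
  | zero => simp [cB] at h
  | succ k ih =>
    by_cases hg : arr.getD (arr.length - 1 - k) 0 = v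
    · refine ⟨arr.length - 1 - k, by simp only [pB, if_pos hg], by omega, by omega, hg, fun t => ?_⟩
      have hkk : arr.length - 1 - (arr.length - 1 - k) = k := by omega
      simp only [sB, cB, if_pos hg, hkk]
      rw [shiftB arr k v t ((arr.length - 1 - k : Nat) : Int)]
      ring
    · have hc : cB arr (k+1) v = cB arr k v := by simp only [cB, if_neg hg]; ring
      obtain ⟨p, hp, hlo, hhi, hgp, hs⟩ := ih (by omega) (by omega)
      refine ⟨p, by simp only [pB, if_neg hg, hp], by omega, hhi, hgp, fun t => ?_⟩
      simp only [sB, if_neg hg, hs t, hc]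
      ring

-- the loop invariants: after processing the first k indices (forward) /
-- all indices ≥ m (backward), the three state components hold these values
def InvF (arr : List Int) (k : Nat) (st : PySem.Dict Int Int × PySem.Dict Int Int × List Int) : Prop :=
  st.2.2.length = arr.length ∧
  (∀ i : Nat, i < arr.length →
      st.2.2.getD i 0 = if i < k then sF arr i (arr.getD i 0) (i : Int) else 0) ∧
  (∀ v : Int, st.2.1.getD v 0 = cF arr k v) ∧
  (∀ v : Int, st.1.getD v 0 = pF arr k v)

def InvB (arr : List Int) (m : Nat) (st : PySem.Dict Int Int × PySem.Dict Int Int × List Int) : Prop :=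
  st.2.2.length = arr.length ∧
  (∀ i : Nat, i < arr.length →
      st.2.2.getD i 0 = if m ≤ i then sB arr (arr.length - 1 - i) (arr.getD i 0) (i : Int) else 0) ∧
  (∀ v : Int, st.2.1.getD v 0 = cB arr (arr.length - m) v) ∧
  (∀ v : Int, st.1.getD v 0 = pB arr (arr.length - m) v)

lemma stepF_inv (arr : List Int) (k : Nat) (st : PySem.Dict Int Int × PySem.Dict Int Int × List Int)
    (hk : k < arr.length) (h : InvF arr k st) :
    InvF arr (k+1) (sumxStep arr st ((k : Nat) : Int)) := by
  obtain ⟨d, c, ans⟩ := st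
  obtain ⟨hlen, hans, hc, hd⟩ := h
  simp only at hlen hans hc hd
  have hv : PySem.List.pyGetD arr ((k : Nat) : Int) 0 = arr.getD k 0 := by simp
  set v := arr.getD k 0 with hvdef
  have hmod : ∀ w : Int, (c.modify v 0 (· + 1)).getD w 0 = if w = v then cF arr k v + 1 else cF arr k w := by
    intro w
    rw [PySem.Dict.getD_modify]
    by_cases hw : w = v
    · rw [if_pos hw, if_pos hw, hc v]
    · rw [if_neg hw, if_neg hw, hc]
  have hw : |((k : Nat) : Int) - d.getD v 0| * ((c.modify v 0 (· + 1)).getD v 0 - 1)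
        + PySem.List.pyGetD ans (d.getD v 0) 0 = sF arr k v ((k : Nat) : Int) := by
    rw [hmod v, if_pos rfl, hd v]
    by_cases hc0 : cF arr k v = 0
    · obtain ⟨hs0, hp0⟩ := zeroF arr k v hc0
      rw [hp0, hc0, hs0]
      have : PySem.List.pyGetD ans 0 0 = ans.getD 0 0 := by
        simpa using PySem.List.pyGetD_natCast (xs := ans) (n := 0) (d := 0)
      rw [this, hans 0 (by omega)]
      have : sF arr 0 (arr.getD 0 0) ((0:Nat) : Int) = 0 := rfl
      by_cases h0k : 0 < k
      · rw [if_pos h0k]; push_cast; ring_nf; exact this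
      · rw [if_neg h0k]; ring
    · obtain ⟨p, hp, hpk, hgp, hs⟩ := posF arr k v (by have := cF_nonneg arr k v; omega)
      rw [hp]
      have h1 : PySem.List.pyGetD ans ((p : Nat) : Int) 0 = ans.getD p 0 := by simp
      rw [h1, hans p (by omega), if_pos hpk, hgp]
      have habs : |((k : Nat) : Int) - (p : Int)| = ((k : Nat) : Int) - (p : Int) := by
        rw [abs_of_nonneg]; omega
      rw [habs, hs ((k : Nat) : Int)]
      ring
  refine ⟨?_, ?_, ?_, ?_⟩
  · simp [sumxStep, hlen]
  · intro i hi
    simp only [sumxStep, hv]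
    rw [PySem.List.pySetD_natCast]
    rw [getD_set_eq ans k _ i (by omega)]
    by_cases hik : i = k
    · rw [if_pos hik, hik, if_pos (by omega), hw]
    · rw [if_neg hik, hans i hi]
      by_cases hlt : i < k
      · rw [if_pos hlt, if_pos (by omega)]
      · rw [if_neg hlt, if_neg (by omega)]
  · intro w
    simp only [sumxStep, hv]
    rw [hmod w]
    by_cases hwv : w = v
    · rw [if_pos hwv, hwv]
      simp only [cF]
      rw [if_pos hvdef.symm]
    · rw [if_neg hwv]
      simp only [cF]
      rw [if_neg (fun hh => hwv (hh.symm.trans hvdef.symm))]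
      ring
  · intro w
    simp only [sumxStep, hv]
    rw [PySem.Dict.getD_insert]
    simp only [pF]
    by_cases hwv : w = v
    · rw [if_pos hwv, if_pos (hvdef.symm.trans hwv.symm ▸ rfl)]
    · rw [if_neg hwv, if_neg (fun hh => hwv (hh.symm.trans hvdef.symm)), hd w]

lemma stepB_inv (arr : List Int) (m : Nat) (st : PySem.Dict Int Int × PySem.Dict Int Int × List Int)
    (hm : m < arr.length) (h : InvB arr (m+1) st) :
    InvB arr m (sumxStep arr st ((m : Nat) : Int)) := by
  obtain ⟨d, c, ans⟩ := st
  obtain ⟨hlen, hans, hc, hd⟩ := h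
  simp only at hlen hans hc hd
  have hv : PySem.List.pyGetD arr ((m : Nat) : Int) 0 = arr.getD m 0 := by simp
  set v := arr.getD m 0 with hvdef
  have hk1 : arr.length - m = (arr.length - (m+1)) + 1 := by omega
  have hidx : arr.length - 1 - (arr.length - (m+1)) = m := by omega
  have hmod : ∀ w : Int, (c.modify v 0 (· + 1)).getD w 0
      = if w = v then cB arr (arr.length - (m+1)) v + 1 else cB arr (arr.length - (m+1)) w := by
    intro w
    rw [PySem.Dict.getD_modify]
    by_cases hw : w = v
    · rw [if_pos hw, if_pos hw, hc v]
    · rw [if_neg hw, if_neg hw, hc]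
  have hcnew : ∀ w : Int, (if w = v then cB arr (arr.length - (m+1)) v + 1 else cB arr (arr.length - (m+1)) w)
      = cB arr (arr.length - m) w := by
    intro w
    rw [hk1]
    simp only [cB, hidx]
    by_cases hw : w = v
    · rw [if_pos hw, hw, if_pos hvdef.symm]
    · rw [if_neg hw, if_neg (fun hh => hw (hh.symm.trans hvdef.symm))]
      ring
  have hw : |((m : Nat) : Int) - d.getD v 0| * ((c.modify v 0 (· + 1)).getD v 0 - 1)
        + PySem.List.pyGetD ans (d.getD v 0) 0 = sB arr (arr.length - 1 - m) v ((m : Nat) : Int) := by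
    have hkk : arr.length - 1 - m = arr.length - (m+1) := by omega
    rw [hmod v, if_pos rfl, hd v, hkk]
    by_cases hc0 : cB arr (arr.length - (m+1)) v = 0
    · obtain ⟨hs0, hp0⟩ := zeroB arr (arr.length - (m+1)) v hc0
      rw [hp0, hc0, hs0]
      have h0 : PySem.List.pyGetD ans 0 0 = ans.getD 0 0 := by
        simpa using PySem.List.pyGetD_natCast (xs := ans) (n := 0) (d := 0)
      rw [h0, hans 0 (by omega), if_neg (by omega)]
      ring
    · obtain ⟨p, hp, hlo, hhi, hgp, hs⟩ :=
        posB arr (arr.length - (m+1)) v (by omega) (by have := cB_nonneg arr (arr.length - (m+1)) v; omega)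
      rw [hp]
      have h1 : PySem.List.pyGetD ans ((p : Nat) : Int) 0 = ans.getD p 0 := by simp
      have hmp : m + 1 ≤ p := by omega
      rw [h1, hans p hhi, if_pos hmp, hgp]
      have habs : |((m : Nat) : Int) - (p : Int)| = (p : Int) - ((m : Nat) : Int) := by
        rw [abs_of_nonpos (by omega)]; ring
      rw [habs, hs ((m : Nat) : Int)]
      ring
  refine ⟨?_, ?_, ?_, ?_⟩
  · simp [sumxStep, hlen]
  · intro i hi
    simp only [sumxStep, hv]
    rw [PySem.List.pySetD_natCast]
    rw [getD_set_eq ans m _ i (by omega)]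
    by_cases him : i = m
    · rw [if_pos him, him, if_pos (by omega), hw]
    · rw [if_neg him, hans i hi]
      by_cases hle : m + 1 ≤ i
      · rw [if_pos hle, if_pos (by omega)]
      · rw [if_neg hle, if_neg (by omega)]
  · intro w
    simp only [sumxStep, hv]
    rw [hmod w, hcnew w]
  · intro w
    simp only [sumxStep, hv]
    rw [PySem.Dict.getD_insert, hk1]
    simp only [pB, hidx]
    by_cases hwv : w = v
    · rw [if_pos hwv, if_pos (hvdef.symm.trans hwv.symm ▸ rfl)]
    · rw [if_neg hwv, if_neg (fun hh => hwv (hh.symm.trans hvdef.symm)), hd w]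

lemma foldF (arr : List Int) :
    ∀ (m k : Nat) (st : PySem.Dict Int Int × PySem.Dict Int Int × List Int),
      k + m = arr.length → InvF arr k st →
      InvF arr arr.length ((List.range' k m).foldl (fun s (p : Nat) => sumxStep arr s (p : Int)) st) := by
  intro m
  induction m with
  | zero => intro k st hk h; simpa [show k = arr.length by omega] using h
  | succ m ih =>
    intro k st hk h
    rw [List.range'_succ]
    simp only [List.foldl_cons]
    exact ih (k+1) _ (by omega) (stepF_inv arr k st (by omega) h)

lemma foldB (arr : List Int) :
    ∀ (m : Nat) (st : PySem.Dict Int Int × PySem.Dict Int Int × List Int),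
      m ≤ arr.length → InvB arr m st →
      InvB arr 0 (((List.range m).reverse).foldl (fun s (p : Nat) => sumxStep arr s (p : Int)) st) := by
  intro m
  induction m with
  | zero => intro st _ h; simpa using h
  | succ m ih =>
    intro st hm h
    rw [show (List.range (m+1)).reverse = m :: (List.range m).reverse by simp [List.range_succ]]
    simp only [List.foldl_cons]
    exact ih _ (by omega) (stepB_inv arr m st (by omega) h)

lemma initF (arr : List Int) :
    InvF arr 0 (PySem.Dict.empty, PySem.Dict.empty, List.replicate arr.length 0) := by
  refine ⟨by simp, fun i hi => ?_, fun v => by simp [cF], fun v => by simp [pF]⟩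
  simp

lemma initB (arr : List Int) :
    InvB arr arr.length (PySem.Dict.empty, PySem.Dict.empty, List.replicate arr.length 0) := by
  refine ⟨by simp, fun i hi => ?_, fun v => by simp [cB], fun v => by simp [pB]⟩
  rw [if_neg (by omega)]
  simp

-- B's per-index generator sums equal the bookkeeping sums
lemma innerF (arr : List Int) (v t : Int) :
    ∀ k : Nat,
      (((PySem.List.pyRange 0 (k : Int) 1).filter
          (fun p => PySem.List.pyGetD arr p 0 == v)).map (fun p => t - p)).sum
        = sF arr k v t := by
  intro k
  induction k with
  | zero => simp [sF, PySem.List.pyRange_one_eq_nil]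
  | succ k ih =>
    have hsucc : ((k+1 : Nat) : Int) = (k : Int) + 1 := by omega
    rw [hsucc, PySem.List.pyRange_one_succ_right (by positivity)]
    rw [List.filter_append, List.map_append, List.sum_append]
    simp only [List.filter_cons, List.filter_nil]
    by_cases hg : arr.getD k 0 = v
    · rw [if_pos (by simpa using hg)]
      simp only [List.map_cons, List.map_nil, List.sum_cons, List.sum_nil]
      simp only [sF, if_pos hg, ih]
      ring
    · rw [if_neg (by simpa using hg)]
      simp only [sF, if_neg hg, ih]
      simp

lemma innerB (arr : List Int) (v t : Int) :
    ∀ k : Nat, k ≤ arr.length →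
      (((PySem.List.pyRange ((arr.length - k : Nat) : Int) (arr.length : Int) 1).filter
          (fun p => PySem.List.pyGetD arr p 0 == v)).map (fun p => p - t)).sum
        = sB arr k v t := by
  intro k
  induction k with
  | zero =>
    intro _
    simp [sB, PySem.List.pyRange_one_eq_nil]
  | succ k ih =>
    intro hk
    have hlt : ((arr.length - (k+1) : Nat) : Int) < (arr.length : Int) := by omega
    rw [PySem.List.pyRange_one_cons hlt]
    have hnext : ((arr.length - (k+1) : Nat) : Int) + 1 = ((arr.length - k : Nat) : Int) := by
      omega
    rw [hnext]
    simp only [List.filter_cons]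
    have hidx : arr.length - (k+1) = arr.length - 1 - k := by omega
    by_cases hg : arr.getD (arr.length - 1 - k) 0 = v
    · rw [if_pos (by simp only [PySem.List.pyGetD_natCast, hidx]; simpa using hg)]
      simp only [List.map_cons, List.sum_cons]
      rw [ih (by omega)]
      simp only [sB, if_pos hg, hidx]
      ring
    · rw [if_neg (by simp only [PySem.List.pyGetD_natCast, hidx]; simpa using hg)]
      rw [ih (by omega)]
      simp only [sB, if_neg hg]
      ring

lemma getD_eq_getElem' (l : List Int) (i : Nat) (hi : i < l.length) : l.getD i 0 = l[i] := by
  rw [List.getD, List.getElem?_eq_getElem hi]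
  rfl

lemma sumx_agree (arr : List Int) (flag : Bool) : sum_x arr flag = sum_x_alt arr flag := by
  cases flag
  · -- backward
    have hA : sum_x arr false
        = (((List.range arr.length).reverse).foldl (fun s (p : Nat) => sumxStep arr s (p : Int))
            (PySem.Dict.empty, PySem.Dict.empty, List.replicate arr.length 0)).2.2 := by
      simp only [sum_x, Bool.false_eq_true, if_false]
      rw [PySem.List.pyRange_zero_nat, ← List.map_reverse, List.foldl_map]
    obtain ⟨hlen, hans, -, -⟩ := foldB arr arr.length _ le_rfl (initB arr)
    have hB : sum_x_alt arr false
        = (List.range arr.length).map (fun i => sB arr (arr.length - 1 - i) (arr.getD i 0) (i : Int)) := by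
      simp only [sum_x_alt, Bool.false_eq_true, if_false]
      rw [PySem.List.pyRange_zero_nat, List.map_map]
      refine List.map_congr_left (fun i hi => ?_)
      have hi' : i < arr.length := List.mem_range.mp hi
      have hv : PySem.List.pyGetD arr ((i : Nat) : Int) 0 = arr.getD i 0 := by simp
      have hstart : ((arr.length - (arr.length - 1 - i) : Nat) : Int) = (i : Int) + 1 := by
        omega
      have := innerB arr (arr.getD i 0) (i : Int) (arr.length - 1 - i) (by omega)
      rw [hstart] at this
      simpa [hv] using this
    rw [hA, hB]
    refine List.ext_getElem (by rw [hlen, List.length_map, List.length_range]) (fun i h1 h2 => ?_)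
    have hi : i < arr.length := hlen ▸ h1
    have := hans i hi
    rw [if_pos (by omega)] at this
    rw [← getD_eq_getElem' _ i h1, this]
    simp
  · -- forward
    have hA : sum_x arr true
        = ((List.range' 0 arr.length).foldl (fun s (p : Nat) => sumxStep arr s (p : Int))
            (PySem.Dict.empty, PySem.Dict.empty, List.replicate arr.length 0)).2.2 := by
      simp only [sum_x, if_true]
      rw [PySem.List.pyRange_zero_nat, List.foldl_map, List.range_eq_range']
    obtain ⟨hlen, hans, -, -⟩ := foldF arr arr.length 0 _ (by omega) (initF arr)
    have hB : sum_x_alt arr true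
        = (List.range arr.length).map (fun i => sF arr i (arr.getD i 0) (i : Int)) := by
      simp only [sum_x_alt, if_true]
      rw [PySem.List.pyRange_zero_nat, List.map_map]
      refine List.map_congr_left (fun i hi => ?_)
      have hv : PySem.List.pyGetD arr ((i : Nat) : Int) 0 = arr.getD i 0 := by simp
      have := innerF arr (arr.getD i 0) (i : Int) i
      simpa [hv] using this
    rw [hA, hB]
    refine List.ext_getElem (by rw [hlen, List.length_map, List.length_range]) (fun i h1 h2 => ?_)
    have hi : i < arr.length := hlen ▸ h1
    have := hans i hi
    rw [if_pos (by omega)] at this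
    rw [← getD_eq_getElem' _ i h1, this]
    simp

-- ===== VERDICT (by name: the statement is the Claim_ definition above) =====
theorem sum_x_spec : Claim_equal_sum_x := by
  intro arr flag _
  unfold Spec_sum_x
  exact sumx_agree arr flag
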